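-- pv_equiv track=rewrite | github.com/hadi41/hadi_LZ_package | hadi_LZ_package/python_backend/lz_inefficient.py | LZ78
-- ===== SOURCE A (Python) =====
-- def LZ78(input_string: str):
--     """Calculates LZ78 complexity and the dictionary for a given string.
--
--     The LZ78 algorithm parses the string, adding new phrases to a dictionary.
--     A phrase is new if it's formed by a previously seen phrase plus one new character,
--     or if it's a single new character not yet seen as a prefix.
--     The implementation here checks if the `current_word` is a prefix of any existing
--     dictionary word to decide if it should continue extending `current_word`.
--
--     Args:
--         input_string: The string to analyze.
--
--     Returns:
--         A tuple containing:
--             - dictionary (list[str]): The list of phrases in the LZ78 dictionary.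
--             - complexity (int): The number of phrases in the dictionary (LZ78 complexity).
--     """
--     n = len(input_string)
--     if n == 0:
--         return [], 0
--
--     dictionary = []
--     current_word = ''
--     remaining_string = input_string
--
--     while remaining_string != '':
--         current_word += remaining_string[0]
--         remaining_string = remaining_string[1:]
--         current_word_len = len(current_word)
--
--         # Check if the current_word is a prefix of any word already in the dictionary.
--         # If it is, we continue extending current_word with the next character.
--         is_prefix_of_existing_word = False
--         for existing_word_in_dict in dictionary:
--             if len(existing_word_in_dict) >= current_word_len:
--                 if existing_word_in_dict.startswith(current_word):
--                     is_prefix_of_existing_word = True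
--                     break
--
--         # If current_word is NOT a prefix of any existing dictionary word,
--         # it means this current_word is a new phrase.
--         if not is_prefix_of_existing_word:
--             dictionary.append(current_word)
--             current_word = '' # Reset for the next phrase
--
--     # If the loop finishes and current_word is not empty,
--     # it means the last part of the string formed a phrase that was being extended.
--     if current_word != '':
--         dictionary.append(current_word)
--
--     return dictionary, len(dictionary)
-- ===== SOURCE B (Python) =====
-- def LZ78(input_string: str):
--     """LZ78 parsing via a trie of the dictionary phrases.
--
--     A's dictionary (as a set of phrases) is prefix-closed, so the trie's paths
--     are exactly the phrases: each phrase is found by walking the trie from the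
--     root, following characters by index (no slicing of the remaining string,
--     no scan over the dictionary), then adding one new child node.
--     """
--     trie = {}  # nested dicts: char -> child trie
--     phrases = []
--     i, n = 0, len(input_string)
--     while i < n:
--         node = trie
--         j = i
--         while j < n and input_string[j] in node:
--             node = node[input_string[j]]
--             j += 1
--         if j < n:
--             node[input_string[j]] = {}
--             phrases.append(input_string[i:j + 1])
--             i = j + 1
--         else:
--             # string exhausted mid-phrase: the leftover is the final phrase
--             phrases.append(input_string[i:])
--             i = j
--     return phrases, len(phrases)
-- ===== Notes on version B (the rewrite author's own statement) =====
-- stated objective: faster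
-- what changed: B replaces A's char-by-char loop that scans the whole dictionary with startswith on ever-resliced strings by a trie of the phrases walked by index: each phrase is found by following child pointers from the root, so the inner scan over the dictionary disappears entirely.
import Mathlib
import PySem

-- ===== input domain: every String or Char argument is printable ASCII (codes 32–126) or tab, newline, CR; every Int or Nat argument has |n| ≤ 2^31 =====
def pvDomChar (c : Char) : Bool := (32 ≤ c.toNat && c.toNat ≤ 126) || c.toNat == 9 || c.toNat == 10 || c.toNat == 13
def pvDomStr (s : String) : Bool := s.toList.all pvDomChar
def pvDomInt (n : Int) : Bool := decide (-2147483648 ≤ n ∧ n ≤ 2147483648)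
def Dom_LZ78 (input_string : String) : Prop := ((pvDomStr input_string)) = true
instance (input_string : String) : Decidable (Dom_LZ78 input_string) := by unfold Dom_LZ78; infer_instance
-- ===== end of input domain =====

-- B replaces A's inner scan of the dictionary by a trie of the phrases walked by
-- index; objective: faster (measured), same return value.

-- ===== PORT A =====
-- A's inner for-loop over the dictionary: skip words shorter than current_word,
-- break (true) on the first word that startswith current_word.
def LZ78_isPrefix (dict : List (List Char)) (cur : List Char) : Bool :=
  match dict with
  | [] => false
  | w :: rest =>
      if cur.length ≤ w.length then
        if PySem.Chars.startswith w cur then true else LZ78_isPrefix rest cur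
      else LZ78_isPrefix rest cur

-- A's while loop: consume the first char of the remaining string, extend current_word,
-- append it to the dictionary and reset when it is a prefix of no dictionary word.
def LZ78_loop (dict : List (List Char)) (cur : List Char) (rem : List Char) :
    List (List Char) × List Char :=
  match rem with
  | [] => (dict, cur)
  | c :: rest =>
      let cw := cur ++ [c]
      if LZ78_isPrefix dict cw then LZ78_loop dict cw rest
      else LZ78_loop (dict ++ [cw]) [] rest

def LZ78 (input_string : String) : List String × Int :=
  if input_string.toList.length = 0 then ([], 0)
  else
    let p := LZ78_loop [] [] input_string.toList
    let d := if p.2 ≠ [] then p.1 ++ [p.2] else p.1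
    (d.map String.ofList, (d.length : Int))

-- ===== PORT B =====
-- Source B's trie of nested dicts: a node's child dict (char -> node) is ported as a
-- lookup function Char → OTrie (a mutual option type; a nested 'Option Trie' is
-- not allowed); 'c in node' / 'node[c]' is 'Trie.child t c'.
mutual
inductive Trie where
  | node : (Char → OTrie) → Trie
inductive OTrie where
  | none : OTrie
  | some : Trie → OTrie
end

def Trie.child : Trie → Char → OTrie
  | .node f, c => f c

-- Source B's inner while loop: number of chars of rem matched walking child pointers.
def Trie.matchLen : Trie → List Char → Nat
  | _, [] => 0
  | t, c :: rest =>
      match t.child c with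
      | .none => 0
      | .some t' => t'.matchLen rest + 1

-- Source B's 'node[input_string[j]] = {}': the in-place pointer mutation is ported as
-- a functional re-insertion of the new phrase's path from the root.
def Trie.insert : Trie → List Char → Trie
  | t, [] => t
  | .node f, c :: rest =>
      let child := match f c with
        | OTrie.none => Trie.node fun _ => OTrie.none
        | OTrie.some u => u
      Trie.node fun c' => if c' = c then OTrie.some (child.insert rest) else f c'

-- Source B's outer while loop: cut one phrase (longest trie walk plus one char, or
-- the whole leftover) off the front of rem and recurse.
def LZ78_alt_loop (t : Trie) (rem : List Char) : List (List Char) :=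
  match rem with
  | [] => []
  | c :: rest =>
      let k := t.matchLen (c :: rest)
      if k < (c :: rest).length then
        (c :: rest).take (k + 1) ::
          LZ78_alt_loop (t.insert ((c :: rest).take (k + 1))) ((c :: rest).drop (k + 1))
      else [c :: rest]
termination_by rem.length
decreasing_by simp [List.length_drop]

def LZ78_alt (input_string : String) : List String × Int :=
  let ph := LZ78_alt_loop (Trie.node fun _ => OTrie.none) input_string.toList
  (ph.map String.ofList, (ph.length : Int))

-- ===== PRECONDITION & SPEC =====
def Spec_LZ78 (input_string : String) (out : List String × Int) : Prop := out = LZ78_alt input_string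
instance (input_string : String) (out : List String × Int) : Decidable (Spec_LZ78 input_string out) := by unfold Spec_LZ78; infer_instance

-- ===== CLAIM (what is proved, stated in full; the proofs are below) =====
def Claim_equal_LZ78 : Prop := ∀ (input_string : String), Dom_LZ78 input_string → Spec_LZ78 input_string (LZ78 input_string)

-- ===== LEMMAS AND PROOFS =====

-- A's inner scan succeeds iff current_word is a prefix of some dictionary word
-- (the length test in A is redundant: a prefix is never longer).
lemma isPrefix_iff (dict : List (List Char)) (cur : List Char) :
    LZ78_isPrefix dict cur = true ↔ ∃ w ∈ dict, cur <+: w := by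
  induction dict with
  | nil => simp [LZ78_isPrefix]
  | cons w rest ih =>
      simp only [LZ78_isPrefix]
      split_ifs with h1 h2
      · simp only [true_iff]
        exact ⟨w, by simp, (PySem.Chars.startswith_iff w cur).mp h2⟩
      · rw [ih]
        constructor
        · rintro ⟨v, hv, hp⟩; exact ⟨v, by simp [hv], hp⟩
        · rintro ⟨v, hv, hp⟩
          rcases List.mem_cons.mp hv with rfl | hv'
          · exact absurd ((PySem.Chars.startswith_iff v cur).mpr hp) (by simpa using h2)
          · exact ⟨v, hv', hp⟩
      · rw [ih]
        constructor
        · rintro ⟨v, hv, hp⟩; exact ⟨v, by simp [hv], hp⟩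
        · rintro ⟨v, hv, hp⟩
          rcases List.mem_cons.mp hv with rfl | hv'
          · exact absurd hp.length_le (by omega)
          · exact ⟨v, hv', hp⟩

-- Prefix-closedness of the dictionary set.
def PrefClosed (dict : List (List Char)) : Prop :=
  ∀ w ∈ dict, ∀ p, p ≠ [] → p <+: w → p ∈ dict

-- On a prefix-closed dictionary, "prefix of some word" is plain membership.
lemma isPrefix_eq_mem (dict : List (List Char)) (cur : List Char)
    (hc : PrefClosed dict) (hne : cur ≠ []) :
    LZ78_isPrefix dict cur = true ↔ cur ∈ dict := by
  rw [isPrefix_iff]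
  constructor
  · rintro ⟨w, hw, hp⟩; exact hc w hw cur hne hp
  · intro h; exact ⟨cur, h, List.prefix_refl cur⟩

lemma prefClosed_snoc (dict : List (List Char)) (cur : List Char) (c : Char)
    (hc : PrefClosed dict) (hcur : cur = [] ∨ cur ∈ dict) :
    PrefClosed (dict ++ [cur ++ [c]]) := by
  intro w hw p hpne hp
  rcases List.mem_append.mp hw with hw' | hw'
  · exact List.mem_append.mpr (Or.inl (hc w hw' p hpne hp))
  · simp only [List.mem_singleton] at hw'
    subst hw'
    rcases List.prefix_concat_iff.mp hp with rfl | hp'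
    · simp
    · have hcurne : cur ≠ [] := by
        rintro rfl; exact hpne (List.prefix_nil.mp hp')
      rcases hcur with rfl | hmem
      · exact absurd rfl hcurne
      · exact List.mem_append.mpr (Or.inl (hc cur hmem p hpne hp'))

-- Membership of a path in the trie (proof-side characterisation of the walk).
def Trie.memB : Trie → List Char → Bool
  | _, [] => true
  | t, c :: rest =>
      match t.child c with
      | .none => false
      | .some t' => t'.memB rest

lemma memB_take (rem : List Char) : ∀ (t : Trie) (i : Nat), i ≤ t.matchLen rem →
    t.memB (rem.take i) = true := by
  induction rem with
  | nil =>
      intro t i hi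
      simp [Trie.matchLen] at hi
      simp [hi, Trie.memB]
  | cons c rest ih =>
      intro t i hi
      cases i with
      | zero => simp [Trie.memB]
      | succ j =>
          cases hch : t.child c with
          | none => simp [Trie.matchLen, hch] at hi
          | some t' =>
              simp [Trie.matchLen, hch] at hi
              simp only [List.take_succ_cons, Trie.memB, hch]
              exact ih t' j (by omega)

lemma memB_insert (q : List Char) : ∀ (t : Trie) (p : List Char),
    (t.insert p).memB q = (t.memB q || decide (q <+: p)) := by
  induction q with
  | nil => intro t p; simp [Trie.memB]
  | cons c qr ih =>
      intro t p
      cases t with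
      | node f =>
          cases p with
          | nil => simp [Trie.insert, Trie.memB]
          | cons d pr =>
              by_cases hcd : c = d
              · subst hcd
                have hchild : (Trie.insert (Trie.node f) (c :: pr)).child c
                    = OTrie.some ((match f c with
                        | OTrie.none => Trie.node fun _ => OTrie.none
                        | OTrie.some u => u).insert pr) := by
                  simp [Trie.insert, Trie.child]
                simp only [Trie.memB]
                rw [hchild]
                simp only [ih]
                cases hfc : f c with
                | none =>
                    cases qr with
                    | nil => simp [hfc, Trie.memB, Trie.child]
                    | cons e qrr => simp [hfc, Trie.memB, Trie.child, List.cons_prefix_cons]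
                | some u => simp [hfc, Trie.child, List.cons_prefix_cons]
              · have hchild : (Trie.insert (Trie.node f) (d :: pr)).child c = f c := by
                  simp [Trie.insert, Trie.child, hcd]
                simp only [Trie.memB]
                rw [hchild]
                simp [Trie.child, List.cons_prefix_cons, hcd]

-- One phrase of A's char-level loop, driven by the trie node u sitting at path cur.
lemma A_inner (t : Trie) (dict : List (List Char))
    (hmem : ∀ q, q ≠ [] → (t.memB q = true ↔ q ∈ dict))
    (hc : PrefClosed dict) :
    ∀ (rem cur : List Char) (u : Trie),
      (∀ q, u.memB q = t.memB (cur ++ q)) → (cur = [] ∨ cur ∈ dict) →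
      LZ78_loop dict cur rem =
        (if u.matchLen rem < rem.length then
          LZ78_loop (dict ++ [cur ++ rem.take (u.matchLen rem + 1)]) []
            (rem.drop (u.matchLen rem + 1))
         else (dict, cur ++ rem)) := by
  intro rem
  induction rem with
  | nil =>
      intro cur u _ _
      simp [LZ78_loop, Trie.matchLen]
  | cons c rest ih =>
      intro cur u hu hcur
      have hcw : u.memB [c] = t.memB (cur ++ [c]) := hu [c]
      simp only [LZ78_loop]
      have hpref : LZ78_isPrefix dict (cur ++ [c]) = t.memB (cur ++ [c]) := by
        cases hb : t.memB (cur ++ [c]) with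
        | true =>
            exact (isPrefix_eq_mem dict _ hc (by simp)).mpr
              ((hmem _ (by simp)).mp hb)
        | false =>
            rw [Bool.eq_false_iff]
            intro hpp
            have := (hmem _ (by simp)).mpr ((isPrefix_eq_mem dict _ hc (by simp)).mp hpp)
            rw [this] at hb; exact absurd hb (by simp)
      cases hch : u.child c with
      | none =>
          have hf : t.memB (cur ++ [c]) = false := by
            rw [← hcw]; simp [Trie.memB, hch]
          rw [hpref, hf]
          simp only [Bool.false_eq_true, if_false]
          have hk : u.matchLen (c :: rest) = 0 := by simp [Trie.matchLen, hch]
          rw [hk]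
          simp [List.take_succ_cons]
      | some u' =>
          have htr : t.memB (cur ++ [c]) = true := by
            rw [← hcw]; simp [Trie.memB, hch]
          rw [hpref, htr]
          simp only [if_true]
          have hu' : ∀ q, u'.memB q = t.memB ((cur ++ [c]) ++ q) := by
            intro q
            have := hu ([c] ++ q)
            simpa [Trie.memB, hch, List.append_assoc] using this
          have hcur' : cur ++ [c] = [] ∨ cur ++ [c] ∈ dict :=
            Or.inr ((hmem _ (by simp)).mp htr)
          rw [ih (cur ++ [c]) u' hu' hcur']
          have hk : u.matchLen (c :: rest) = u'.matchLen rest + 1 := by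
            simp [Trie.matchLen, hch]
          rw [hk]
          simp [List.take_succ_cons, List.append_assoc]

-- The tail-of-string finalisation A performs after its loop.
def finalizeA (p : List (List Char) × List Char) : List (List Char) :=
  if p.2 ≠ [] then p.1 ++ [p.2] else p.1

-- Main invariant: A's loop from an empty current word equals B's phrase loop,
-- whenever the trie's nonempty paths are exactly the dictionary's phrases.
lemma outer : ∀ (n : Nat) (rem : List Char), rem.length ≤ n →
    ∀ (dict : List (List Char)) (t : Trie),
      (∀ q, q ≠ [] → (t.memB q = true ↔ q ∈ dict)) → PrefClosed dict →
      finalizeA (LZ78_loop dict [] rem) = dict ++ LZ78_alt_loop t rem := by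
  intro n
  induction n with
  | zero =>
      intro rem hlen dict t _ _
      have : rem = [] := List.length_eq_zero_iff.mp (by omega)
      subst this
      simp [LZ78_loop, LZ78_alt_loop, finalizeA]
  | succ m ih =>
      intro rem hlen dict t hmem hc
      cases rem with
      | nil => simp [LZ78_loop, LZ78_alt_loop, finalizeA]
      | cons c rest =>
          simp only [List.length_cons] at hlen
          rw [A_inner t dict hmem hc (c :: rest) [] t (by simp) (Or.inl rfl)]
          rw [LZ78_alt_loop]
          set k := t.matchLen (c :: rest) with hkdef
          by_cases hk : k < (c :: rest).length
          all_goals have hk2 : (c :: rest).length = rest.length + 1 := by simp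
          · rw [if_pos hk, if_pos hk]
            set p := (c :: rest).take (k + 1) with hpdef
            have hplen : p.length = k + 1 := by
              rw [hpdef]; simp; omega
            -- the new phrase p = (take k) ++ [char k]
            have hsplit : p = (c :: rest).take k ++ [(c :: rest)[k]] := by
              rw [hpdef, List.take_add_one, List.getElem?_eq_getElem hk]
              simp
            have htk_mem : (c :: rest).take k = [] ∨ (c :: rest).take k ∈ dict := by
              by_cases hk0 : k = 0
              · left; simp [hk0]
              · right
                have hne : (c :: rest).take k ≠ [] := by
                  have hl2 : ((c :: rest).take k).length = k := by simp; omega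
                  intro hnil; rw [hnil] at hl2; simp at hl2; omega
                exact (hmem _ hne).mp (memB_take _ t k (by omega))
            have hc' : PrefClosed (dict ++ [p]) := by
              rw [hsplit]
              exact prefClosed_snoc dict _ _ hc htk_mem
            have hmem' : ∀ q, q ≠ [] → ((t.insert p).memB q = true ↔ q ∈ dict ++ [p]) := by
              intro q hq
              rw [memB_insert]
              simp only [Bool.or_eq_true, decide_eq_true_eq, List.mem_append,
                List.mem_singleton]
              constructor
              · rintro (hm | hpref)
                · exact Or.inl ((hmem q hq).mp hm)
                · by_cases hqp : q = p
                  · exact Or.inr hqp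
                  · left
                    have hql : q.length < p.length := by
                      rcases Nat.lt_or_ge q.length p.length with h | h
                      · exact h
                      · exact absurd (List.IsPrefix.eq_of_length_le hpref h) hqp
                    have hqtake : q = (c :: rest).take q.length := by
                      have hmin : min q.length (k + 1) = q.length := by omega
                      conv_lhs => rw [List.prefix_iff_eq_take.mp hpref]
                      rw [hpdef, List.take_take, hmin]
                    refine (hmem q hq).mp ?_
                    rw [hqtake]
                    exact memB_take _ t q.length (by omega)
              · rintro (hd | rfl)
                · exact Or.inl ((hmem q hq).mpr hd)
                · right; exact List.prefix_refl p
            have hrec := ih ((c :: rest).drop (k + 1)) (by simp only [List.length_drop]; omega)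
              (dict ++ [p]) (t.insert p) hmem' hc'
            simp only [List.nil_append]
            rw [hrec]
            simp [List.append_assoc]
          · rw [if_neg hk, if_neg hk]
            simp [finalizeA]

-- ===== VERDICT (by name: the statement is the Claim_ definition above) =====
theorem LZ78_spec : Claim_equal_LZ78 := by
  intro s _
  unfold Spec_LZ78
  have hroot : ∀ q, q ≠ [] →
      ((Trie.node fun _ => OTrie.none).memB q = true ↔ q ∈ ([] : List (List Char))) := by
    intro q hq
    cases q with
    | nil => exact absurd rfl hq
    | cons c rest => simp [Trie.memB, Trie.child]
  have hout := outer s.toList.length s.toList le_rfl []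
    (Trie.node fun _ => OTrie.none) hroot (by intro w hw; simp at hw)
  simp only [List.nil_append, finalizeA] at hout
  simp only [LZ78, LZ78_alt]
  by_cases h : s.toList.length = 0
  · rw [if_pos h]
    have h0 : s.toList = [] := List.length_eq_zero_iff.mp h
    rw [h0]
    simp [LZ78_alt_loop]
  · rw [if_neg h, ← hout]
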